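-- pv_equiv track=rewrite | github.com/VladimirDip/NextStep_algoritms | 3. Final tasks/A. Photocopies.py | get_max_photocopy
-- ===== SOURCE A (Python) =====
-- def get_max_photocopy(dc_quantity: int, dc_capacity: list, count_photos=0) -> int:
--     if dc_quantity > 1:
--         dc_capacity.sort()
--
--         while dc_capacity[-2] > 0:
--             dc_capacity[-1] -= 1
--             dc_capacity[-2] -= 1
--             count_photos += 1
--             dc_capacity.sort()
--         return count_photos
--
--     return count_photos
-- ===== SOURCE B (Python) =====
-- def get_max_photocopy(dc_quantity: int, dc_capacity: list, count_photos=0) -> int: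
--     # Closed form: repeatedly pairing the two largest positive capacities yields
--     # min(total // 2, total - mx) photocopies, where total is the sum of the
--     # positive capacities and mx the largest one.
--     if dc_quantity > 1:
--         pos = [x for x in dc_capacity if x > 0]
--         total = sum(pos)
--         mx = max(pos, default=0)
--         return count_photos + min(total // 2, total - mx)
--     return count_photos
-- ===== Notes on version B (the rewrite author's own statement) =====
-- stated objective: simpler
-- what changed: Replaces A's simulate-every-pairing loop (re-sorting the list after each single decrement of the two largest capacities) by the closed form count_photos + min(total//2, total - max) over the positive capacities.
import Mathlib
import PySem

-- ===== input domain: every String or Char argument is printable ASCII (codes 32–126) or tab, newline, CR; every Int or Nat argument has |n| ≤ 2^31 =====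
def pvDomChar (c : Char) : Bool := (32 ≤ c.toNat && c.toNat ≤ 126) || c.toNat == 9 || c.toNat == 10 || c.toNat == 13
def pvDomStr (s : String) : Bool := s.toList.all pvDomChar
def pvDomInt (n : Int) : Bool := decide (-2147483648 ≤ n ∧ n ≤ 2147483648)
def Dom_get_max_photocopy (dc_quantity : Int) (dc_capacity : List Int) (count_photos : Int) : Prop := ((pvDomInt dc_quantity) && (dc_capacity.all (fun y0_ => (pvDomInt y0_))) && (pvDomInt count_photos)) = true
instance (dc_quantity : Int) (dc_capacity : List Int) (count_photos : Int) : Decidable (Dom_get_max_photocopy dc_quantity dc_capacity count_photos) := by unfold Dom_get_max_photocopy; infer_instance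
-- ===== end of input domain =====

-- B replaces A's simulate-every-pairing loop by the closed form
-- count_photos + min(total // 2, total - max) over the positive capacities.
-- A mutates dc_capacity in place (sorts and decrements it), B does not: the equivalence
-- proved here is about the RETURN value only.

-- ===== PORT A =====
-- sum of the positive entries; used only as the termination measure of A's while loop
def posSum (l : List Int) : Int := (l.filter (fun x => decide (x > 0))).sum

lemma posSum_nonneg (l : List Int) : 0 ≤ posSum l := by
  apply List.sum_nonneg
  intro x hx
  have := (List.mem_filter.mp hx).2
  simp at this; omega

lemma posSum_append (u v : List Int) : posSum (u ++ v) = posSum u + posSum v := by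
  simp [posSum, List.filter_append]

lemma posSum_pair (x y : Int) :
    posSum [x, y] = (if x > 0 then x else 0) + (if y > 0 then y else 0) := by
  by_cases hx : x > 0 <;> by_cases hy : y > 0 <;> simp [posSum, hx, hy]

lemma posSum_perm {l l' : List Int} (h : l.Perm l') : posSum l = posSum l' :=
  List.Perm.sum_eq (h.filter _)

lemma pyGet_len2 {cap : List Int} {b : Int} (h : PySem.List.pyGet? cap (-2) = some b) :
    2 ≤ cap.length := by
  by_contra hlen
  have : PySem.List.pyGet? cap (-2) = none := by
    rw [PySem.List.pyGet?_eq_none_iff]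
    simp [PySem.Raise.InRange]
    omega
  rw [this] at h; cases h

lemma split_two {cap : List Int} {a b : Int}
    (h1 : PySem.List.pyGet? cap (-1) = some a)
    (h2 : PySem.List.pyGet? cap (-2) = some b) :
    cap = cap.dropLast.dropLast ++ [b, a] := by
  have hlen : 2 ≤ cap.length := pyGet_len2 h2
  rw [PySem.List.pyGet?_neg_one] at h1
  obtain ⟨d, rfl⟩ := List.getLast?_eq_some_iff.mp h1
  have hd : 1 ≤ d.length := by simp at hlen; omega
  rw [PySem.List.pyGet?_neg_ofNat _ 2 (by omega) (by simpa using hlen)] at h2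
  have hix : (d ++ [a]).length - 2 = d.length - 1 := by simp
  rw [hix, List.getElem?_append_left (by omega)] at h2
  obtain ⟨e, rfl⟩ := List.getLast?_eq_some_iff.mp
    (by rw [List.getLast?_eq_getElem?]; exact h2)
  simp [List.dropLast_concat]

-- the while loop of A: condition dc_capacity[-2] > 0 on the (always sorted) list;
-- the body's two item assignments dc_capacity[-1] -= 1; dc_capacity[-2] -= 1 are
-- realised as replacing the last two elements (exact: the list has ≥ 2 elements
-- whenever the two pyGet? succeed), followed by .sort()
def loopA (cap : List Int) (count : Int) : Int :=
  match h2 : PySem.List.pyGet? cap (-2) with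
  | none => count      -- Python raises IndexError here; excluded by Pre_
  | some b =>
    if hb : b > 0 then
      match h1 : PySem.List.pyGet? cap (-1) with
      | none => count  -- unreachable: cap has ≥ 2 elements when h2 matches
      | some a =>
          loopA (PySem.List.sorted (cap.dropLast.dropLast ++ [b - 1, a - 1]) (fun x => x) false)
            (count + 1)
    else count
termination_by (posSum cap).toNat
decreasing_by
  have hsplit := split_two h1 h2
  have e1 : posSum (PySem.List.sorted (cap.dropLast.dropLast ++ [b - 1, a - 1]) (fun x => x) false)
      = posSum (cap.dropLast.dropLast ++ [b - 1, a - 1]) :=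
    posSum_perm (PySem.List.sorted_perm _ _ _)
  have h0 := posSum_nonneg cap.dropLast.dropLast
  have hc : posSum cap = posSum cap.dropLast.dropLast + posSum [b, a] := by
    conv_lhs => rw [hsplit]
    exact posSum_append _ _
  rw [e1, posSum_append, posSum_pair]
  rw [posSum_pair] at hc
  split_ifs at hc ⊢ <;> omega

def get_max_photocopy (dc_quantity : Int) (dc_capacity : List Int) (count_photos : Int) : Int :=
  if dc_quantity > 1 then
    loopA (PySem.List.sorted dc_capacity (fun x => x) false) count_photos
  else count_photos

-- ===== PORT B =====
def get_max_photocopy_alt (dc_quantity : Int) (dc_capacity : List Int) (count_photos : Int) : Int :=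
  if dc_quantity > 1 then
    let pos := dc_capacity.filter (fun x => decide (x > 0))
    let total := pos.sum
    let mx := PySem.List.maxD pos (fun x => x) 0
    count_photos + min (PySem.Int.floordiv total 2) (total - mx)
  else count_photos

-- ===== PRECONDITION & SPEC =====
-- Pre_ excludes exactly the inputs where A raises: dc_quantity > 1 with fewer than
-- 2 capacities makes dc_capacity[-2] raise IndexError.
def Pre_get_max_photocopy (dc_quantity : Int) (dc_capacity : List Int) (count_photos : Int) : Prop :=
  dc_quantity ≤ 1 ∨ 2 ≤ dc_capacity.length

instance (dc_quantity : Int) (dc_capacity : List Int) (count_photos : Int) : Decidable (Pre_get_max_photocopy dc_quantity dc_capacity count_photos) := by unfold Pre_get_max_photocopy; infer_instance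

def pvWitness_get_max_photocopy : Int × List Int × Int := (2, ([1, 2], 0))

def Spec_get_max_photocopy (dc_quantity : Int) (dc_capacity : List Int) (count_photos : Int) (out : Int) : Prop := out = get_max_photocopy_alt dc_quantity dc_capacity count_photos
instance (dc_quantity : Int) (dc_capacity : List Int) (count_photos : Int) (out : Int) : Decidable (Spec_get_max_photocopy dc_quantity dc_capacity count_photos out) := by unfold Spec_get_max_photocopy; infer_instance

-- ===== CLAIM (what is proved, stated in full; the proofs are below) =====
def Claim_equal_get_max_photocopy : Prop := ∀ (dc_quantity : Int) (dc_capacity : List Int) (count_photos : Int), Dom_get_max_photocopy dc_quantity dc_capacity count_photos → Pre_get_max_photocopy dc_quantity dc_capacity count_photos → Spec_get_max_photocopy dc_quantity dc_capacity count_photos (get_max_photocopy dc_quantity dc_capacity count_photos)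

-- ===== LEMMAS AND PROOFS =====

-- the largest positive entry (0 if none); the value B's maxD computes
def posMax (l : List Int) : Int :=
  PySem.List.maxD (l.filter (fun x => decide (x > 0))) (fun x => x) 0

-- the closed-form value B adds to count_photos
def fval (l : List Int) : Int := min (posSum l / 2) (posSum l - posMax l)

lemma posMax_nonneg (l : List Int) : 0 ≤ posMax l := by
  unfold posMax PySem.List.maxD
  cases h : PySem.List.max? (l.filter (fun x => decide (x > 0))) (fun x => x) with
  | none => simp
  | some m =>
    have hm := PySem.List.max?_mem h
    have := (List.mem_filter.mp hm).2
    simp at this ⊢; omega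

lemma posMax_le {l : List Int} {c : Int} (hc : 0 ≤ c) (h : ∀ x ∈ l, x ≤ c) :
    posMax l ≤ c := by
  unfold posMax PySem.List.maxD
  cases hm : PySem.List.max? (l.filter (fun x => decide (x > 0))) (fun x => x) with
  | none => simpa
  | some m =>
    have := PySem.List.max?_mem hm
    simpa using h m (List.mem_filter.mp this).1

lemma le_posMax {l : List Int} {x : Int} (hx : x ∈ l) (hpos : 0 < x) : x ≤ posMax l := by
  have hxf : x ∈ l.filter (fun x => decide (x > 0)) := List.mem_filter.mpr ⟨hx, by simpa⟩
  unfold posMax PySem.List.maxD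
  cases hm : PySem.List.max? (l.filter (fun x => decide (x > 0))) (fun x => x) with
  | none =>
    rw [PySem.List.max?_eq_none_iff] at hm
    rw [hm] at hxf; cases hxf
  | some m => simpa using PySem.List.max?_isMax hm x hxf

lemma posMax_mem_or_zero (l : List Int) :
    posMax l = 0 ∨ posMax l ∈ l.filter (fun x => decide (x > 0)) := by
  unfold posMax PySem.List.maxD
  cases hm : PySem.List.max? (l.filter (fun x => decide (x > 0))) (fun x => x) with
  | none => left; rfl
  | some m => right; simpa using PySem.List.max?_mem hm

lemma posMax_perm {l l' : List Int} (h : l.Perm l') : posMax l = posMax l' := by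
  have hf : (l.filter (fun x => decide (x > 0))).Perm (l'.filter (fun x => decide (x > 0))) :=
    h.filter _
  unfold posMax PySem.List.maxD
  cases h1 : PySem.List.max? (l.filter (fun x => decide (x > 0))) (fun x => x) with
  | none =>
    rw [PySem.List.max?_eq_none_iff] at h1
    have : l'.filter (fun x => decide (x > 0)) = [] := by
      have := hf; rw [h1] at this; exact this.nil_eq.symm
    rw [this]
    rfl
  | some m1 =>
    cases h2 : PySem.List.max? (l'.filter (fun x => decide (x > 0))) (fun x => x) with
    | none =>
      rw [PySem.List.max?_eq_none_iff] at h2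
      have := hf; rw [h2] at this
      have h3 : l.filter (fun x => decide (x > 0)) = [] := this.eq_nil
      rw [(PySem.List.max?_eq_none_iff _ _).mpr h3] at h1; cases h1
    | some m2 =>
      have hm1 := PySem.List.max?_mem h1
      have hm2 := PySem.List.max?_mem h2
      have h12 : m1 ≤ m2 := by
        simpa using PySem.List.max?_isMax h2 m1 (hf.mem_iff.mp hm1)
      have h21 : m2 ≤ m1 := by
        simpa using PySem.List.max?_isMax h1 m2 (hf.mem_iff.mpr hm2)
      simp; omega

lemma fval_perm {l l' : List Int} (h : l.Perm l') : fval l = fval l' := by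
  unfold fval; rw [posSum_perm h, posMax_perm h]

lemma exists_two {s : List Int} (h : 2 ≤ s.length) : ∃ u b a, s = u ++ [b, a] := by
  have hne : s ≠ [] := by intro h'; rw [h'] at h; simp at h
  obtain ⟨a, ha⟩ : ∃ a, s.getLast? = some a := ⟨_, List.getLast?_eq_some_getLast hne⟩
  obtain ⟨d, rfl⟩ := List.getLast?_eq_some_iff.mp ha
  have hdne : d ≠ [] := by intro h'; subst h'; simp at h
  obtain ⟨b, hb⟩ : ∃ b, d.getLast? = some b := ⟨_, List.getLast?_eq_some_getLast hdne⟩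
  obtain ⟨e, rfl⟩ := List.getLast?_eq_some_iff.mp hb
  exact ⟨e, b, a, by simp⟩

lemma loopA_sorted_eq : ∀ (n : Nat) (l : List Int), (posSum l).toNat ≤ n → 2 ≤ l.length →
    ∀ c : Int, loopA (PySem.List.sorted l (fun x => x) false) c = c + fval l := by
  intro n
  induction n using Nat.strong_induction_on with
  | _ n ih =>
    intro l hn hlen c
    have hperm : (PySem.List.sorted l (fun x => x) false).Perm l := PySem.List.sorted_perm _ _ _
    have hslen : 2 ≤ (PySem.List.sorted l (fun x => x) false).length := by
      rw [hperm.length_eq]; exact hlen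
    obtain ⟨u, b, a, hsplit⟩ := exists_two hslen
    have hpw : (PySem.List.sorted l (fun x => x) false).Pairwise (fun x y => x ≤ y) :=
      PySem.List.sorted_pairwise _ _
    rw [hsplit] at hpw hperm
    obtain ⟨hpu, hpba, hcross⟩ := List.pairwise_append.mp hpw
    have hba : b ≤ a := by simpa using hpba
    have hub : ∀ x ∈ u, x ≤ b := fun x hx => hcross x hx b (by simp)
    -- the two negative-index reads on the sorted list
    have hg2 : PySem.List.pyGet? (u ++ [b, a]) (-2) = some b := by
      rw [PySem.List.pyGet?_neg_ofNat _ 2 (by omega) (by simp)]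
      rw [show (u ++ [b, a]).length - 2 = u.length by simp]
      rw [List.getElem?_append_right (by omega)]
      simp
    have hg1 : PySem.List.pyGet? (u ++ [b, a]) (-1) = some a := by
      rw [show u ++ [b, a] = (u ++ [b]) ++ [a] by simp]
      exact PySem.List.pyGet?_neg_one_append_singleton _ _
    have hdrop : (u ++ [b, a]).dropLast.dropLast = u := by
      rw [show u ++ [b, a] = (u ++ [b]) ++ [a] by simp, List.dropLast_concat,
        List.dropLast_concat]
    have hfl : fval l = fval (u ++ [b, a]) := fval_perm hperm.symm
    have hPl : posSum (u ++ [b, a]) = posSum u + posSum [b, a] := posSum_append _ _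
    have h0 := posSum_nonneg u
    rw [hsplit, loopA.eq_def]
    split
    · next heq => rw [hg2] at heq; cases heq
    · next b' heq =>
      rw [hg2] at heq
      obtain rfl : b = b' := by injection heq
      split
      · next hb =>
        split
        · next heq1 => rw [hg1] at heq1; cases heq1
        · next a' heq1 =>
          rw [hg1] at heq1
          obtain rfl : a = a' := by injection heq1
          rw [hdrop]
          have ha : 0 < a := lt_of_lt_of_le hb hba
          have hP2 : posSum [b, a] = b + a := by rw [posSum_pair]; split_ifs <;> omega
          have hPl' : posSum (u ++ [b - 1, a - 1]) = posSum u + (b - 1) + (a - 1) := by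
            rw [posSum_append, posSum_pair]; split_ifs <;> omega
          have hPeq : posSum l = posSum (u ++ [b, a]) := posSum_perm hperm.symm
          have hlt : (posSum (u ++ [b - 1, a - 1])).toNat < n := by omega
          rw [ih _ hlt (u ++ [b - 1, a - 1]) le_rfl (by simp) (c + 1)]
          -- arithmetic step: fval (u ++ [b-1, a-1]) + 1 = fval (u ++ [b, a])
          have hM : posMax (u ++ [b, a]) = a := by
            apply le_antisymm
            · apply posMax_le (by omega)
              intro x hx
              rcases List.mem_append.mp hx with hx | hx
              · exact le_trans (hub x hx) hba
              · simp at hx; rcases hx with rfl | rfl <;> omega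
            · exact le_posMax (by simp) ha
          have hM'le : posMax (u ++ [b - 1, a - 1]) ≤ a := by
            apply posMax_le (by omega)
            intro x hx
            rcases List.mem_append.mp hx with hx | hx
            · exact le_trans (hub x hx) hba
            · simp at hx; rcases hx with rfl | rfl <;> omega
          have hM'ge : a - 1 ≤ posMax (u ++ [b - 1, a - 1]) := by
            by_cases ha1 : 0 < a - 1
            · exact le_posMax (by simp) ha1
            · have := posMax_nonneg (u ++ [b - 1, a - 1]); omega
          by_cases hMa : posMax (u ++ [b - 1, a - 1]) = a
          · -- the maximum survives: some element of u equals a, so posSum u ≥ a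
            have hmem : a ∈ (u ++ [b - 1, a - 1]).filter (fun x => decide (x > 0)) := by
              rcases posMax_mem_or_zero (u ++ [b - 1, a - 1]) with h' | h'
              · omega
              · rwa [hMa] at h'
            have hau : a ∈ u := by
              have := List.mem_filter.mp hmem
              rcases List.mem_append.mp this.1 with h' | h'
              · exact h'
              · simp at h'; omega
            have haS : a ≤ posSum u := by
              apply List.single_le_sum _ _ (List.mem_filter.mpr ⟨hau, by simpa⟩)
              intro x hx
              have := (List.mem_filter.mp hx).2; simp at this; omega
            rw [hfl]
            unfold fval
            rw [hPl, hP2, hPl', hM, hMa]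
            omega
          · have hMa' : posMax (u ++ [b - 1, a - 1]) = a - 1 := by omega
            rw [hfl]
            unfold fval
            rw [hPl, hP2, hPl', hM, hMa']
            omega
      · next hb =>
        -- second-largest ≤ 0: at most one positive entry, closed form is 0
        have hb0 : b ≤ 0 := by omega
        have hfu : posSum u = 0 := by
          unfold posSum
          rw [List.filter_eq_nil_iff.mpr ?_]
          · rfl
          · intro x hx; have := hub x hx; simp; omega
        have hM : posMax (u ++ [b, a]) = max a 0 := by
          apply le_antisymm
          · apply posMax_le (by omega)
            intro x hx
            rcases List.mem_append.mp hx with hx | hx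
            · have := hub x hx; omega
            · simp at hx; rcases hx with rfl | rfl <;> omega
          · by_cases ha : 0 < a
            · have := le_posMax (l := u ++ [b, a]) (x := a) (by simp) ha; omega
            · have := posMax_nonneg (u ++ [b, a]); omega
        have hP2 : posSum [b, a] = max a 0 := by rw [posSum_pair]; split_ifs <;> omega
        rw [hfl]
        unfold fval
        rw [hPl, hP2, hM, hfu]
        omega

-- ===== VERDICT (by name: the statement is the Claim_ definition above) =====
theorem get_max_photocopy_spec : Claim_equal_get_max_photocopy := by
  intro dq cap cp _ hpre
  unfold Spec_get_max_photocopy get_max_photocopy get_max_photocopy_alt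
  by_cases h : dq > 1
  · have hlen : 2 ≤ cap.length := by
      rcases hpre with h' | h'
      · omega
      · exact h'
    rw [if_pos h, if_pos h,
      loopA_sorted_eq (posSum cap).toNat cap le_rfl hlen cp]
    simp only [fval, posSum, posMax,
      PySem.Int.floordiv_eq_ediv_of_pos (show (0:Int) < 2 by norm_num)]
  · rw [if_neg h, if_neg h]
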